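-- pv_equiv track=rewrite | github.com/junebug-junie/Orion-Sapienform | orion/cognition/planner/rdf_sync.py | _pascal_case
-- ===== SOURCE A (Python) =====
-- from typing import Dict, Optional, List
--
-- def _pascal_case(name: str) -> str:
--     """
--     Convert snake_case or kebab-case or spaced text to PascalCase.
--     Example:
--         'introspection_prompt' -> 'IntrospectionPrompt'
--     """
--     # replace non-alnum with space, then title-case and join
--     cleaned_chars: List[str] = []
--     for ch in name:
--         if ch.isalnum():
--             cleaned_chars.append(ch)
--         else:
--             cleaned_chars.append(" ")
--     cleaned = "".join(cleaned_chars)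
--     parts = [p for p in cleaned.split(" ") if p]
--     return "".join(p.capitalize() for p in parts)
-- ===== SOURCE B (Python) =====
-- def _pascal_case(name: str) -> str:
--     """Single streaming pass: emit PascalCase directly, no intermediate
--     cleaned string or parts list."""
--     out = []
--     new_word = True
--     for ch in name:
--         if ch.isalnum():
--             out.append(ch.title() if new_word else ch.lower())
--             new_word = False
--         else:
--             new_word = True
--     return "".join(out)
-- ===== Notes on version B (the rewrite author's own statement) =====
-- stated objective: simpler
-- what changed: Replaces the build-cleaned-string / split / filter / capitalize-each-part / join pipeline with one streaming pass over the characters that tracks a word-start flag and emits each output character directly.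
import Mathlib
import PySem

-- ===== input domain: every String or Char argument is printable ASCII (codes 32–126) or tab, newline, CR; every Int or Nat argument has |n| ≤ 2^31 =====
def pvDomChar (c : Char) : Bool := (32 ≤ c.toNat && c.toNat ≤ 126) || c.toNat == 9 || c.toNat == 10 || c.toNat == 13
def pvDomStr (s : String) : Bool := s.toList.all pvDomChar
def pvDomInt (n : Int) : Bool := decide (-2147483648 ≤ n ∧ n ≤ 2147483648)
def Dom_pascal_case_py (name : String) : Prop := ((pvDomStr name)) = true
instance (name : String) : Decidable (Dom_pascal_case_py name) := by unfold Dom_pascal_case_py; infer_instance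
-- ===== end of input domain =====

-- B replaces A's clean/split/capitalize/join pipeline by one streaming pass (objective: simpler).

-- ===== PORT A =====
-- hand port of Python str.capitalize: first char titlecased, rest lowered — exact on the ASCII domain,
-- where titlecase = uppercase
def pyCapitalize (w : List Char) : List Char :=
  match w with
  | [] => []
  | c :: cs => PySem.Chars.upperChar c :: cs.map PySem.Chars.lowerChar

def pascal_case_py (name : String) : String :=
  -- for ch in name: append ch if ch.isalnum() else ' '
  let cleaned_chars : List Char :=
    name.toList.foldl (fun acc ch => acc ++ [if PySem.Chars.isalnum ch then ch else ' ']) []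
  -- "".join of a list of single characters is that character list
  let cleaned : List Char := cleaned_chars
  let parts : List (List Char) := (PySem.Chars.splitOn cleaned [' ']).filter (fun p => !p.isEmpty)
  String.ofList (PySem.Chars.join [] (parts.map pyCapitalize))

-- ===== PORT B =====
def pcGo : List Char → Bool → List Char
  | [], _ => []
  | ch :: cs, new_word =>
      if PySem.Chars.isalnum ch then
        (if new_word then PySem.Chars.upperChar ch else PySem.Chars.lowerChar ch) :: pcGo cs false
      else
        pcGo cs true

def pascal_case_py_alt (name : String) : String :=
  String.ofList (pcGo name.toList true)

-- ===== PRECONDITION & SPEC =====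
def Spec_pascal_case_py (name : String) (out : String) : Prop := out = pascal_case_py_alt name
instance (name : String) (out : String) : Decidable (Spec_pascal_case_py name out) := by unfold Spec_pascal_case_py; infer_instance

-- ===== CLAIM (what is proved, stated in full; the proofs are below) =====
def Claim_equal_pascal_case_py : Prop := ∀ (name : String), Dom_pascal_case_py name → Spec_pascal_case_py name (pascal_case_py name)

-- ===== LEMMAS AND PROOFS =====

-- reference splitter: split a char list on ' ', carrying the current chunk reversed
def pvSpl : List Char → List Char → List (List Char)
  | [], cur => [cur.reverse]
  | c :: cs, cur => if c = ' ' then cur.reverse :: pvSpl cs [] else pvSpl cs (c :: cur)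

theorem pvGo_eq (fuel : Nat) (l cur : List Char) (acc : List (List Char))
    (h : l.length < fuel) :
    PySem.Chars.splitOn.go [' '] fuel l cur acc = acc.reverse ++ pvSpl l cur := by
  induction fuel generalizing l cur acc with
  | zero => omega
  | succ n ih =>
    cases l with
    | nil => simp [PySem.Chars.splitOn.go, pvSpl]
    | cons c cs =>
      by_cases hc : c = ' '
      · subst hc
        have hdrop : List.drop [' '].length (' ' :: cs) = cs := rfl
        simp only [PySem.Chars.splitOn.go, List.isPrefixOf, BEq.rfl, Bool.true_and,
          if_true, hdrop]
        rw [ih cs [] (cur.reverse :: acc) (by simpa using Nat.lt_of_succ_lt_succ h)]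
        simp [pvSpl]
      · have hbe : ((' ' : Char) == c) = false := by
          simp; exact fun h' => hc h'.symm
        simp only [PySem.Chars.splitOn.go, List.isPrefixOf, hbe, Bool.false_and,
          Bool.false_eq_true, if_false, pvSpl, if_neg hc]
        exact ih cs (c :: cur) acc (by simpa using Nat.lt_of_succ_lt_succ h)

theorem pvSplitOn_eq (l : List Char) :
    PySem.Chars.splitOn l [' '] = pvSpl l [] := by
  unfold PySem.Chars.splitOn
  simpa using pvGo_eq (l.length + 1) l [] [] (by omega)

theorem pvJoinNil (parts : List (List Char)) :
    PySem.Chars.join [] parts = parts.flatten := by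
  induction parts with
  | nil => rfl
  | cons p ps ih =>
    cases ps with
    | nil => simp [PySem.Chars.join, List.intercalate]
    | cons q qs =>
      rw [PySem.Chars.join_cons_cons, ih]
      simp

theorem pvCapNil : pyCapitalize [] = [] := rfl

theorem pvFlattenFilter (parts : List (List Char)) :
    (List.filter (fun p => !p.isEmpty) parts |>.map pyCapitalize).flatten
      = (parts.map pyCapitalize).flatten := by
  induction parts with
  | nil => rfl
  | cons p ps ih =>
    cases p with
    | nil => simpa [List.filter, pvCapNil] using ih
    | cons c cs => simp [List.filter, ih]

theorem pvCapSnoc (w : List Char) (c : Char) :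
    pyCapitalize (w ++ [c])
      = if w = [] then [PySem.Chars.upperChar c]
        else pyCapitalize w ++ [PySem.Chars.lowerChar c] := by
  cases w with
  | nil => rfl
  | cons h t => simp [pyCapitalize]

theorem pvFoldlMap (l : List Char) (acc : List Char) :
    l.foldl (fun acc ch => acc ++ [if PySem.Chars.isalnum ch then ch else ' ']) acc
      = acc ++ l.map (fun ch => if PySem.Chars.isalnum ch then ch else ' ') := by
  induction l generalizing acc with
  | nil => simp
  | cons c cs ih => simp [List.foldl, ih]

-- the main invariant: A's pipeline starting with current chunk `cur` equals
-- the capitalized finished chunk plus B's streaming remainder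
theorem pvMain (l : List Char) (cur : List Char) :
    ((pvSpl (l.map (fun ch => if PySem.Chars.isalnum ch then ch else ' ')) cur).map
        pyCapitalize).flatten
      = pyCapitalize cur.reverse ++ pcGo l (cur.isEmpty) := by
  induction l generalizing cur with
  | nil => simp [pvSpl, pcGo]
  | cons c cs ih =>
    by_cases hc : PySem.Chars.isalnum c = true
    · have hne : c ≠ ' ' := by
        intro h; subst h; exact absurd hc (by decide)
      simp only [List.map_cons, hc, if_true, pvSpl, if_neg hne, pcGo]
      rw [ih (c :: cur)]
      rw [List.reverse_cons, pvCapSnoc]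
      cases cur with
      | nil => simp [pyCapitalize]
      | cons h t => simp
    · have hc' : PySem.Chars.isalnum c = false := by simpa using hc
      have hsp : pvSpl (' ' :: cs.map (fun ch => if PySem.Chars.isalnum ch then ch else ' ')) cur
          = cur.reverse :: pvSpl (cs.map (fun ch => if PySem.Chars.isalnum ch then ch else ' ')) [] := by
        simp [pvSpl]
      simp only [List.map_cons, hc', if_false, pcGo, Bool.false_eq_true, hsp,
        List.map_cons, List.flatten_cons]
      rw [ih []]
      simp [pyCapitalize]

-- ===== VERDICT (by name: the statement is the Claim_ definition above) =====
theorem pascal_case_py_spec : Claim_equal_pascal_case_py := by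
  intro name _
  unfold Spec_pascal_case_py pascal_case_py pascal_case_py_alt
  simp only [pvFoldlMap, List.nil_append, pvSplitOn_eq, pvJoinNil, pvFlattenFilter]
  rw [pvMain name.toList []]
  rfl
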